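-- pv_equiv track=rewrite | github.com/gromas/3-SAT-solver-algorithm | src/sat_solver.py | _is_2cnf_satisfiable
-- ===== SOURCE A (Python) =====
-- from typing import List, Tuple, Dict, Set, Optional
--
-- def _is_2cnf_satisfiable(clauses: List[Tuple]) -> bool:
--     """
--     Check if a 2-CNF formula is satisfiable.
--
--     This is a simplified implementation. For production use,
--     consider a more efficient 2-SAT algorithm.
--     """
--     if not clauses:
--         return True
--
--     # Extract all variables from clauses
--     all_lits = set()
--     for clause in clauses:
--         for lit in clause:
--             all_lits.add(abs(lit))
--
--     # Brute-force check for small formulas (for demonstration)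
--     # In a full implementation, use implication graph algorithm
--     n = len(all_lits)
--     variables = list(all_lits)
--
--     for i in range(2**n):
--         assignment = {}
--         for j, var in enumerate(variables):
--             assignment[var] = (i >> j) & 1
--
--         # Check all clauses
--         satisfied = True
--         for clause in clauses:
--             clause_ok = False
--             for lit in clause:
--                 var = abs(lit)
--                 value = assignment.get(var, 0)  # Default to 0 if not in this subset
--                 if (lit > 0 and value == 1) or (lit < 0 and value == 0):
--                     clause_ok = True
--                     break
--
--             if not clause_ok:
--                 satisfied = False
--                 break
--
--         if satisfied:
--             return True
--
--     return False
-- ===== SOURCE B (Python) =====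
-- def _is_2cnf_satisfiable(clauses):
--     """DPLL-style splitting solver: pick a variable from the first clause,
--     simplify the formula under each polarity of it, and recurse."""
--     def assign(cs, v, positive):
--         pol = v if positive else -v
--         neg = -pol
--         return [[x for x in c if x != neg] for c in cs if pol not in c]
--
--     def solve(cs):
--         if not cs:
--             return True
--         lit = next((l for l in cs[0] if l != 0), 0)
--         if lit == 0:
--             return False
--         v = abs(lit)
--         return solve(assign(cs, v, lit > 0)) or solve(assign(cs, v, lit < 0))
--
--     return solve([list(c) for c in clauses])
-- ===== Notes on version B (the rewrite author's own statement) =====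
-- stated objective: alternative
-- what changed: A enumerates all 2^n assignments over the collected variable set and checks every clause under each; B is a DPLL-style splitting solver that picks the first nonzero literal of the first clause, simplifies the formula under each polarity of its variable, and recurses.
import Mathlib
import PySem

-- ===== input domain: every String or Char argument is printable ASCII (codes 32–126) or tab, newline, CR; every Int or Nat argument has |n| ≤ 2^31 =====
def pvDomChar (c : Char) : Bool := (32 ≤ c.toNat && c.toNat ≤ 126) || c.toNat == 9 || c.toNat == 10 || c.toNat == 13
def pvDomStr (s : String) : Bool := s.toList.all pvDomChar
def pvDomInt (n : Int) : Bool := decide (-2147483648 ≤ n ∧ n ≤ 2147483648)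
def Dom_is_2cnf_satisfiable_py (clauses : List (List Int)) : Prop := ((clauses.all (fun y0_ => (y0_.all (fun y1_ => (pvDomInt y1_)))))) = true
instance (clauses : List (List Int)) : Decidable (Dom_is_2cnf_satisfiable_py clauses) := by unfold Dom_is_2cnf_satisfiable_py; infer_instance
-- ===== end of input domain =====

-- B replaces A's enumeration of all 2^n assignments by a DPLL-style splitting search
-- that simplifies the formula under each polarity of one chosen variable and recurses.

-- ===== PORT A =====
-- A-side helper: the assignment dict A builds inline from the bits of i
-- (assignment[var] = (i >> j) & 1; j ≥ 0 always, so jv.1.toNat is exact)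
def pvDictA (variables_ : List Int) (i : Int) : PySem.Dict Int Int :=
  (PySem.List.enumerate variables_ 0).foldl
    (fun d jv => d.insert jv.2 (PySem.Int.band (i >>> jv.1.toNat) 1)) PySem.Dict.empty

-- literal port of A's brute force: collect |lit| into a set, loop i over range(2**n),
-- build the assignment dict from the bits of i, check every clause
def is_2cnf_satisfiable_py (clauses : List (List Int)) : Bool :=
  if clauses = [] then true
  else
    let all_lits : PySem.Set Int :=
      clauses.foldl (fun s clause => clause.foldl (fun s lit => PySem.Set.add s |lit|) s)
        PySem.Set.empty
    let n := all_lits.length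
    let variables_ := all_lits
    -- for i in range(2**n): … if satisfied: return True / return False  ⇒  List.any
    (PySem.List.pyRange 0 ((2 ^ n : Nat) : Int) 1).any (fun i =>
      let assignment := pvDictA variables_ i
      -- the flag/break double loop: all clauses must have some satisfied literal
      clauses.all (fun clause =>
        clause.any (fun lit =>
          let var := |lit|
          let value := assignment.getD var 0   -- var is always a key; default 0 unreachable
          (decide (lit > 0) && decide (value = 1)) || (decide (lit < 0) && decide (value = 0)))))

-- ===== PORT B =====
-- Source B's assign(cs, v, positive): drop clauses containing the satisfied polarity,
-- delete the falsified polarity from the remaining clauses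
def pvAssign (cs : List (List Int)) (v : Int) (positive : Bool) : List (List Int) :=
  let pol := if positive then v else -v
  let neg := -pol
  cs.filterMap (fun c => if pol ∈ c then none else some (c.filter (fun x => x != neg)))

-- termination measure for Source B's solve: number of nonzero literals left
def pvMeasure (cs : List (List Int)) : Nat :=
  (cs.map (fun c => c.countP (fun x => x != 0))).sum

lemma pvCountP_filter_ne_le (c : List Int) (neg : Int) :
    (c.filter (fun x => x != neg)).countP (fun x => x != 0) ≤ c.countP (fun x => x != 0) := by
  induction c with
  | nil => simp
  | cons a c ih =>
    by_cases h : a = neg <;> simp [List.countP_cons, h] <;> omega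

lemma pvCountP_filter_ne_lt (c : List Int) (neg : Int) (hneg : neg ≠ 0) (hmem : neg ∈ c) :
    (c.filter (fun x => x != neg)).countP (fun x => x != 0) < c.countP (fun x => x != 0) := by
  induction c with
  | nil => simp at hmem
  | cons a c ih =>
    rcases List.mem_cons.mp hmem with rfl | hm
    · have := pvCountP_filter_ne_le c neg
      simp [hneg]
      omega
    · by_cases h : a = neg
      · have := pvCountP_filter_ne_le c neg
        subst h
        simp [hneg]
        omega
      · have := ih hm
        simp [List.countP_cons, h]
        omega

lemma pvMeasure_filterMap_le (cs : List (List Int)) (pol neg : Int) :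
    pvMeasure (cs.filterMap (fun c => if pol ∈ c then none
      else some (c.filter (fun x => x != neg)))) ≤ pvMeasure cs := by
  induction cs with
  | nil => simp [pvMeasure]
  | cons c cs ih =>
    rw [List.filterMap_cons]
    by_cases h : pol ∈ c
    · rw [if_pos h]
      simp only [pvMeasure, List.map_cons, List.sum_cons] at *
      omega
    · rw [if_neg h]
      have := pvCountP_filter_ne_le c neg
      simp only [pvMeasure, List.map_cons, List.sum_cons] at *
      omega

lemma pvMeasure_assign_lt (c : List Int) (rest : List (List Int)) (lit : Int)
    (hmem : lit ∈ c) (hne : lit ≠ 0) (b : Bool) :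
    pvMeasure (pvAssign (c :: rest) |lit| b) < pvMeasure (c :: rest) := by
  have hrest := pvMeasure_filterMap_le rest (if b then |lit| else -|lit|)
    (-(if b then |lit| else -|lit|))
  have hpos : 0 < c.countP (fun x => x != 0) := by
    rw [List.countP_pos_iff]
    exact ⟨lit, hmem, by simpa using hne⟩
  unfold pvAssign
  dsimp only
  rw [List.filterMap_cons]
  by_cases h : (if b then |lit| else -|lit|) ∈ c
  · rw [if_pos h]
    simp only [pvMeasure, List.map_cons, List.sum_cons] at *
    omega
  · rw [if_neg h]
    have hne' : lit ≠ (if b then |lit| else -|lit|) := by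
      intro e; exact h (e ▸ hmem)
    have hlitneg : (-(if b then |lit| else -|lit|)) = lit := by
      rcases abs_cases lit with ⟨h1, h2⟩ | ⟨h1, h2⟩ <;> rw [h1] at hne' ⊢ <;> cases b <;>
        simp at hne' ⊢ <;> omega
    have := pvCountP_filter_ne_lt c (-(if b then |lit| else -|lit|)) (by omega)
      (by rw [hlitneg]; exact hmem)
    simp only [pvMeasure, List.map_cons, List.sum_cons] at *
    omega

-- Source B's solve: split on the first nonzero literal of the first clause
def is_2cnf_satisfiable_py_alt (clauses : List (List Int)) : Bool :=
  match clauses with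
  | [] => true
  | c :: rest =>
    match h : c.find? (fun l => l != 0) with
    | none => false
    | some lit =>
      is_2cnf_satisfiable_py_alt (pvAssign (c :: rest) |lit| (decide (lit > 0))) ||
      is_2cnf_satisfiable_py_alt (pvAssign (c :: rest) |lit| (decide (lit < 0)))
  termination_by pvMeasure clauses
  decreasing_by
  · exact pvMeasure_assign_lt c rest lit (List.mem_of_find?_eq_some h)
      (by simpa using List.find?_some h) _
  · exact pvMeasure_assign_lt c rest lit (List.mem_of_find?_eq_some h)
      (by simpa using List.find?_some h) _

-- ===== PRECONDITION & SPEC =====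
def Spec_is_2cnf_satisfiable_py (clauses : List (List Int)) (out : Bool) : Prop := out = is_2cnf_satisfiable_py_alt clauses
instance (clauses : List (List Int)) (out : Bool) : Decidable (Spec_is_2cnf_satisfiable_py clauses out) := by unfold Spec_is_2cnf_satisfiable_py; infer_instance

-- ===== CLAIM (what is proved, stated in full; the proofs are below) =====
def Claim_equal_is_2cnf_satisfiable_py : Prop := ∀ (clauses : List (List Int)), Dom_is_2cnf_satisfiable_py clauses → Spec_is_2cnf_satisfiable_py clauses (is_2cnf_satisfiable_py clauses)

-- ===== LEMMAS AND PROOFS =====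

-- truth of a literal under an assignment f of the (positive) variables; 0 is never true, as in A
def pvLitSat (f : Int → Bool) (l : Int) : Bool :=
  if 0 < l then f l else if l < 0 then !f (-l) else false

-- satisfiability: the common specification both programs decide
def pvSat (cs : List (List Int)) : Prop :=
  ∃ f : Int → Bool, ∀ c ∈ cs, ∃ l ∈ c, pvLitSat f l = true

lemma pvLitSat_congr (f g : Int → Bool) (l : Int) (h : f |l| = g |l|) :
    pvLitSat f l = pvLitSat g l := by
  unfold pvLitSat
  by_cases h1 : 0 < l
  · rw [abs_of_pos h1] at h; simp [h1, h]
  · by_cases h2 : l < 0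
    · rw [abs_of_neg h2] at h; simp [h1, h2, h]
    · simp [h1, h2]

-- ---- B decides pvSat ----

lemma pvAssign_forward (cs : List (List Int)) (v : Int) (hv : 0 < v) (f : Int → Bool)
    (h : ∀ c ∈ cs, ∃ l ∈ c, pvLitSat f l = true) :
    ∀ c' ∈ pvAssign cs v (f v), ∃ l ∈ c', pvLitSat f l = true := by
  intro c' hc'
  unfold pvAssign at hc'
  dsimp only at hc'
  rw [List.mem_filterMap] at hc'
  obtain ⟨c, hc, hopt⟩ := hc'
  by_cases hpol : (if f v then v else -v) ∈ c
  · simp [hpol] at hopt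
  · rw [if_neg hpol] at hopt
    obtain rfl : c.filter (fun x => x != -(if f v then v else -v)) = c' := by
      simpa using hopt
    obtain ⟨l, hl, hsat⟩ := h c hc
    have hlneg : l ≠ -(if f v then v else -v) := by
      intro heq
      cases hfv : f v <;> simp only [hfv] at heq <;> simp at heq <;> subst heq <;>
        unfold pvLitSat at hsat
      · rw [if_pos hv] at hsat
        rw [hfv] at hsat; exact Bool.false_ne_true hsat
      · rw [if_neg (by omega), if_pos (by omega), neg_neg] at hsat
        rw [hfv] at hsat; exact Bool.false_ne_true (by simpa using hsat)
    exact ⟨l, List.mem_filter.mpr ⟨hl, by simpa using hlneg⟩, hsat⟩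

lemma pvAssign_backward (cs : List (List Int)) (v : Int) (hv : 0 < v) (b : Bool) (f : Int → Bool)
    (h : ∀ c' ∈ pvAssign cs v b, ∃ l ∈ c', pvLitSat f l = true) :
    ∀ c ∈ cs, ∃ l ∈ c, pvLitSat (fun x => if x = v then b else f x) l = true := by
  intro c hc
  by_cases hpol : (if b then v else -v) ∈ c
  · refine ⟨(if b then v else -v), hpol, ?_⟩
    cases b
    · show pvLitSat _ (-v) = true
      unfold pvLitSat
      rw [if_neg (by omega), if_pos (by omega), neg_neg]
      simp
    · show pvLitSat _ v = true
      unfold pvLitSat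
      rw [if_pos hv]
      simp
  · have hmem : c.filter (fun x => x != -(if b then v else -v)) ∈ pvAssign cs v b := by
      unfold pvAssign
      dsimp only
      rw [List.mem_filterMap]
      exact ⟨c, hc, by rw [if_neg hpol]⟩
    obtain ⟨l, hl, hsat⟩ := h _ hmem
    have hlc := (List.mem_filter.mp hl).1
    have hlne : l ≠ -(if b then v else -v) := by simpa using (List.mem_filter.mp hl).2
    have hlnp : l ≠ (if b then v else -v) := fun e => hpol (e ▸ hlc)
    refine ⟨l, hlc, ?_⟩
    have h12 : l ≠ v ∧ l ≠ -v := by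
      cases b
      · simp at hlne hlnp; exact ⟨hlne, hlnp⟩
      · simp at hlne hlnp; exact ⟨hlnp, hlne⟩
    have habs : |l| ≠ v := by
      rcases abs_cases l with ⟨e, _⟩ | ⟨e, _⟩ <;> rw [e] <;> omega
    rw [pvLitSat_congr (fun x => if x = v then b else f x) f l (by simp [habs])]
    exact hsat

lemma pvSat_split (cs : List (List Int)) (v : Int) (hv : 0 < v) :
    pvSat cs ↔ pvSat (pvAssign cs v true) ∨ pvSat (pvAssign cs v false) := by
  constructor
  · rintro ⟨f, hf⟩
    cases hfv : f v
    · right; exact ⟨f, hfv ▸ pvAssign_forward cs v hv f hf⟩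
    · left; exact ⟨f, hfv ▸ pvAssign_forward cs v hv f hf⟩
  · rintro (⟨f, hf⟩ | ⟨f, hf⟩)
    · exact ⟨_, pvAssign_backward cs v hv true f hf⟩
    · exact ⟨_, pvAssign_backward cs v hv false f hf⟩

lemma alt_iff_pvSat (cs : List (List Int)) :
    is_2cnf_satisfiable_py_alt cs = true ↔ pvSat cs := by
  fun_induction is_2cnf_satisfiable_py_alt cs with
  | case1 => simpa [pvSat] using ⟨fun _ => false, by simp⟩
  | case2 c rest hfind =>
    simp only [Bool.false_eq_true, false_iff]
    rintro ⟨f, hf⟩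
    obtain ⟨l, hl, hsat⟩ := hf c List.mem_cons_self
    have : l = 0 := by simpa using List.find?_eq_none.mp hfind l hl
    subst this
    simp [pvLitSat] at hsat
  | case3 c rest lit hfind ih1 ih2 =>
    have hne : lit ≠ 0 := by simpa using List.find?_some hfind
    have hv : 0 < |lit| := abs_pos.mpr hne
    rw [Bool.or_eq_true, ih1, ih2, pvSat_split (c :: rest) |lit| hv]
    rcases lt_or_gt_of_ne hne with hlt | hgt
    · simp [hlt, not_lt.mpr hlt.le, or_comm]
    · simp [hgt, not_lt.mpr hgt.le]

-- ---- A decides pvSat ----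

-- the set of variables A collects (all_lits in A)
def pvVars (clauses : List (List Int)) : PySem.Set Int :=
  clauses.foldl (fun s clause => clause.foldl (fun s lit => PySem.Set.add s |lit|) s)
    PySem.Set.empty

lemma pvMem_foldl_vars (clauses : List (List Int)) (s : PySem.Set Int) (x : Int) :
    x ∈ clauses.foldl (fun s clause => clause.foldl (fun s lit => PySem.Set.add s |lit|) s) s ↔
      x ∈ s ∨ ∃ c ∈ clauses, ∃ l ∈ c, x = |l| := by
  induction clauses generalizing s with
  | nil => simp
  | cons c cs ih =>
    rw [List.foldl_cons, ih, PySem.Set.mem_foldl_add]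
    constructor
    · rintro (⟨hs | ⟨l, hl, rfl⟩⟩ | ⟨c', hc', l, hl, rfl⟩)
      · exact Or.inl hs
      · exact Or.inr ⟨c, List.mem_cons_self, l, hl, rfl⟩
      · exact Or.inr ⟨c', List.mem_cons_of_mem _ hc', l, hl, rfl⟩
    · rintro (hs | ⟨c', hc', l, hl, rfl⟩)
      · exact Or.inl (Or.inl hs)
      · rcases List.mem_cons.mp hc' with rfl | hc'
        · exact Or.inl (Or.inr ⟨l, hl, rfl⟩)
        · exact Or.inr ⟨c', hc', l, hl, rfl⟩

lemma pvMem_pvVars (clauses : List (List Int)) (x : Int) :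
    x ∈ pvVars clauses ↔ ∃ c ∈ clauses, ∃ l ∈ c, x = |l| := by
  rw [pvVars, pvMem_foldl_vars]
  simp [PySem.Set.empty]

lemma pvNodup_pvVars (clauses : List (List Int)) : (pvVars clauses).Nodup := by
  suffices h : ∀ (s : PySem.Set Int), s.Nodup →
      (clauses.foldl (fun s clause => clause.foldl (fun s lit => PySem.Set.add s |lit|) s)
        s).Nodup from h _ List.nodup_nil
  induction clauses with
  | nil => exact fun s hs => hs
  | cons c cs ih =>
    intro s hs
    refine ih _ ?_
    dsimp only
    rw [← PySem.Set.update_map_eq_foldl_add]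
    exact PySem.Set.nodup_update _ _ hs

lemma pvGetD_dictA (V : List Int) (hnd : V.Nodup) (i : Int) (k : Nat) (hk : k < V.length) :
    (pvDictA V i).getD V[k] 0 = PySem.Int.band (i >>> k) 1 := by
  unfold pvDictA
  have hitems := PySem.Dict.items_foldl_insert_fresh (l := PySem.List.enumerate V 0)
    (k := fun jv => jv.2) (v := fun jv => PySem.Int.band (i >>> ((jv.1.toNat : Nat) : Int)) 1)
    (d := PySem.Dict.empty) (by simp) (by rw [PySem.List.map_snd_enumerate]; exact hnd)
  have hndk : ((PySem.List.enumerate V 0).foldl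
      (fun d jv => d.insert jv.2 (PySem.Int.band (i >>> ((jv.1.toNat : Nat) : Int)) 1))
      PySem.Dict.empty).keys.Nodup :=
    PySem.Dict.nodup_keys_foldl_insert_key _ _ _ _ (by simp)
  have hmem : ((k : Int), V[k]) ∈ PySem.List.enumerate V 0 := by
    rw [PySem.List.mem_enumerate_iff]
    exact ⟨k, hk, by simp⟩
  have hpair : (V[k], PySem.Int.band (i >>> k) 1) ∈
      ((PySem.List.enumerate V 0).foldl
        (fun d jv => d.insert jv.2 (PySem.Int.band (i >>> ((jv.1.toNat : Nat) : Int)) 1))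
        PySem.Dict.empty).items := by
    rw [hitems]
    simp only [List.mem_append]
    right
    refine List.mem_map.mpr ⟨((k : Int), V[k]), hmem, ?_⟩
    simp
    rw [Int.shiftRight_natCast_right]
  exact PySem.Dict.getD_of_mem_items _ hpair hndk 0

-- the assignment A reads off for index i: variable x is true iff its bit of i is 1
def pvFA (V : List Int) (i : Int) : Int → Bool :=
  fun x => decide (PySem.Int.band (i >>> V.idxOf x) 1 = 1)

def pvCondA (value lit : Int) : Bool :=
  (decide (lit > 0) && decide (value = 1)) || (decide (lit < 0) && decide (value = 0))

lemma pvValue_zero_one (i : Int) (k : Nat) :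
    PySem.Int.band (i >>> k) 1 = 0 ∨ PySem.Int.band (i >>> k) 1 = 1 := by
  rw [PySem.Int.band_one]
  have h1 := PySem.Int.mod_nonneg (i >>> k) (b := 2) (by omega)
  have h2 := PySem.Int.mod_lt (i >>> k) (b := 2) (by omega)
  omega

lemma pvCondA_eq (V : List Int) (hnd : V.Nodup) (i lit : Int) (hmem : |lit| ∈ V) :
    pvCondA ((pvDictA V i).getD |lit| 0) lit = pvLitSat (pvFA V i) lit := by
  have hk : V.idxOf |lit| < V.length := List.idxOf_lt_length_of_mem hmem
  have hV : V[V.idxOf |lit|] = |lit| := List.getElem_idxOf hk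
  have hgetD : (pvDictA V i).getD |lit| 0 = PySem.Int.band (i >>> V.idxOf |lit|) 1 := by
    conv_lhs => rw [← hV]
    exact pvGetD_dictA V hnd i _ hk
  have h01 := pvValue_zero_one i (V.idxOf |lit|)
  rcases lt_trichotomy lit 0 with hl | hl | hl
  · rw [pvCondA, pvLitSat, hgetD, if_neg (by omega), if_pos hl, pvFA]
    conv_rhs => rw [← abs_of_neg hl]
    simp only [show ¬ (lit > 0) from by omega, decide_false, Bool.false_and, Bool.false_or,
      decide_eq_true hl, Bool.true_and]
    rcases h01 with h | h <;> rw [h] <;> simp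
  · subst hl
    simp [pvCondA, pvLitSat]
  · rw [pvCondA, pvLitSat, hgetD, if_pos hl, pvFA]
    conv_rhs => rw [← abs_of_pos hl]
    simp only [decide_eq_true hl, Bool.true_and, show ¬ (lit < 0) from by omega, decide_false,
      Bool.false_and, Bool.or_false, gt_iff_lt]

-- packing a list of bits into the Nat whose j-th bit is the j-th entry
def pvPack : List Bool → Nat
  | [] => 0
  | b :: bs => (if b then 1 else 0) + 2 * pvPack bs

lemma pvPack_lt (bs : List Bool) : pvPack bs < 2 ^ bs.length := by
  induction bs with
  | nil => simp [pvPack]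
  | cons b bs ih =>
    simp only [pvPack, List.length_cons, pow_succ]
    cases b <;> simp <;> omega

lemma pvPack_bit (bs : List Bool) (k : Nat) :
    (pvPack bs >>> k) &&& 1 = if bs.getD k false then 1 else 0 := by
  induction bs generalizing k with
  | nil => simp [pvPack]
  | cons b bs ih =>
    cases k with
    | zero =>
      simp only [pvPack, Nat.shiftRight_zero, List.getD_cons_zero, Nat.and_one_is_mod]
      cases b <;> simp <;> omega
    | succ k =>
      rw [List.getD_cons_succ, ← ih k]
      have h2 : pvPack (b :: bs) >>> (k + 1) = pvPack bs >>> k := by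
        rw [Nat.shiftRight_eq_div_pow, Nat.shiftRight_eq_div_pow, pow_succ,
          Nat.mul_comm (2 ^ k) 2, ← Nat.div_div_eq_div_mul]
        congr 1
        show ((if b then 1 else 0) + 2 * pvPack bs) / 2 = pvPack bs
        cases b <;> simp <;> omega
      rw [h2]

lemma pvFA_pack (V : List Int) (f : Int → Bool) (x : Int) (hx : x ∈ V) :
    pvFA V ((pvPack (V.map f) : Nat) : Int) x = f x := by
  have hk : V.idxOf x < V.length := List.idxOf_lt_length_of_mem hx
  have hV : V[V.idxOf x] = x := List.getElem_idxOf hk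
  unfold pvFA
  have hcast : ∀ (N k : Nat), ((N : Int) >>> k) = ((N >>> k : Nat) : Int) := fun N k => rfl
  rw [hcast]
  rw [show (1 : Int) = ((1 : Nat) : Int) from rfl, PySem.Int.band_natCast, pvPack_bit]
  have hgetD : (V.map f).getD (V.idxOf x) false = f x := by
    rw [List.getD_eq_getElem _ _ (by simpa using hk)]
    simp [hV]
  rw [hgetD]
  cases hfx : f x <;> simp

lemma pvA_iff_pvSat (clauses : List (List Int)) :
    is_2cnf_satisfiable_py clauses = true ↔ pvSat clauses := by
  by_cases hnil : clauses = []
  · subst hnil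
    constructor
    · intro _; exact ⟨fun _ => false, by simp⟩
    · intro _; rfl
  · have hA : is_2cnf_satisfiable_py clauses =
        (PySem.List.pyRange 0 ((2 ^ (pvVars clauses).length : Nat) : Int) 1).any (fun i =>
          clauses.all (fun clause =>
            clause.any (fun lit =>
              pvCondA ((pvDictA (pvVars clauses) i).getD |lit| 0) lit))) := by
      rw [is_2cnf_satisfiable_py, if_neg hnil]
      rfl
    have hnd := pvNodup_pvVars clauses
    have hcheck : ∀ i : Int,
        (clauses.all (fun clause =>
          clause.any (fun lit =>
            pvCondA ((pvDictA (pvVars clauses) i).getD |lit| 0) lit)) = true) ↔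
        ∀ c ∈ clauses, ∃ l ∈ c, pvLitSat (pvFA (pvVars clauses) i) l = true := by
      intro i
      rw [List.all_eq_true]
      refine forall_congr' fun c => forall_congr' fun hc => ?_
      rw [List.any_eq_true]
      refine exists_congr fun l => and_congr_right fun hl => ?_
      rw [pvCondA_eq _ hnd i l ((pvMem_pvVars clauses |l|).mpr ⟨c, hc, l, hl, rfl⟩)]
    rw [hA, List.any_eq_true]
    constructor
    · rintro ⟨i, _, hchk⟩
      exact ⟨pvFA (pvVars clauses) i, (hcheck i).mp hchk⟩
    · rintro ⟨f, hf⟩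
      set V := pvVars clauses with hVdef
      refine ⟨((pvPack (V.map f) : Nat) : Int), ?_, ?_⟩
      · rw [PySem.List.mem_pyRange_one]
        have := pvPack_lt (V.map f)
        rw [List.length_map] at this
        constructor
        · positivity
        · exact_mod_cast this
      · refine (hcheck _).mpr fun c hc => ?_
        obtain ⟨l, hl, hsat⟩ := hf c hc
        refine ⟨l, hl, ?_⟩
        rw [pvLitSat_congr _ f l (pvFA_pack V f |l|
          ((pvMem_pvVars clauses |l|).mpr ⟨c, hc, l, hl, rfl⟩))]
        exact hsat

-- ===== VERDICT (by name: the statement is the Claim_ definition above) =====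
theorem is_2cnf_satisfiable_py_spec : Claim_equal_is_2cnf_satisfiable_py := by
  intro clauses _
  unfold Spec_is_2cnf_satisfiable_py
  have h := (pvA_iff_pvSat clauses).trans (alt_iff_pvSat clauses).symm
  cases ha : is_2cnf_satisfiable_py clauses <;> cases hb : is_2cnf_satisfiable_py_alt clauses <;>
    simp_all
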